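-- pv_equiv track=rewrite | github.com/Cansucansu3/ReBloom | ai_service/services/visual_search_service.py | category_from_text
-- ===== SOURCE A (Python) =====
-- CATEGORY_ALIASES = {
--     "top": "tops",
--     "shirt": "tops",
--     "shirts": "tops",
--     "tshirt": "tops",
--     "tshirts": "tops",
--     "t-shirt": "tops",
--     "t-shirts": "tops",
--     "sweater": "tops",
--     "sweatshirt": "tops",
--     "jacket": "tops",
--     "jean": "pants",
--     "jeans": "pants",
--     "trouser": "pants",
--     "trousers": "pants",
--     "short": "shorts",
--     "shorts": "shorts",
--     "track pants": "pants",
--     "skirt": "skirts",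
--     "skirts": "skirts",
--     "dress": "dresses",
--     "dresses": "dresses",
--     "shoe": "shoes",
--     "shoes": "shoes",
--     "heels": "shoes",
--     "flats": "shoes",
--     "sandals": "shoes",
--     "flip flops": "shoes",
--     "bag": "bags",
--     "bags": "bags",
--     "handbag": "bags",
--     "handbags": "bags",
--     "backpack": "bags",
-- }
--
-- def category_from_text(value):
--     text = str(value or "").strip().lower()
--     if not text:
--         return None
--
--     aliases = sorted(CATEGORY_ALIASES.items(), key=lambda item: len(item[0]), reverse=True)
--     for alias, category in aliases:
--         if alias in text:
--             return category
--
--     return None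
-- ===== SOURCE B (Python) =====
-- # Alias table authored the other way round: each category lists its aliases once,
-- # and the lookup is a nested single pass keeping a running longest-match argmax.
-- CATEGORY_TO_ALIASES = {
--     "tops": ["top", "shirt", "shirts", "tshirt", "tshirts", "t-shirt",
--              "t-shirts", "sweater", "sweatshirt", "jacket"],
--     "pants": ["jean", "jeans", "trouser", "trousers", "track pants"],
--     "shorts": ["short", "shorts"],
--     "skirts": ["skirt", "skirts"],
--     "dresses": ["dress", "dresses"],
--     "shoes": ["shoe", "shoes", "heels", "flats", "sandals", "flip flops"],
--     "bags": ["bag", "bags", "handbag", "handbags", "backpack"],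
-- }
--
--
-- def category_from_text(value):
--     text = str(value or "").strip().lower()
--     if not text:
--         return None
--     best_len = -1
--     best_category = None
--     for category, aliases in CATEGORY_TO_ALIASES.items():
--         for alias in aliases:
--             if alias in text and len(alias) > best_len:
--                 best_len = len(alias)
--                 best_category = category
--     return best_category
-- ===== Notes on version B (the rewrite author's own statement) =====
-- stated objective: alternative
-- what changed: B stores the table the other way round (each category maps to a list of its aliases) and replaces A's sort-the-flat-alias-table-then-scan-for-first-match with a nested single pass keeping a running longest-match argmax (best_len/best_category); the strict > comparison in insertion order reproduces the stable sort's longest-first, earliest-wins selection (the only alias whose iteration position changes, 'track pants', has a length shared with no other alias).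
import Mathlib
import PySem

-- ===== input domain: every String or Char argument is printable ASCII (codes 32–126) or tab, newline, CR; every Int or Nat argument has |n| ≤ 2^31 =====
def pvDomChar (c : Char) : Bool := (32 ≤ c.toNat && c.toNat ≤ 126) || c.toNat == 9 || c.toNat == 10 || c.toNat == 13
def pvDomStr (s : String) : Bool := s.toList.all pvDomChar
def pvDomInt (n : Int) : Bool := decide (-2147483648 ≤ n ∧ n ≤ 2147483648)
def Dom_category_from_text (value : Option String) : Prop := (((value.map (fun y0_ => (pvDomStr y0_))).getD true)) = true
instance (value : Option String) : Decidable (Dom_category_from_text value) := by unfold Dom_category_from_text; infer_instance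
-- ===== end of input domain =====

-- B keeps a category -> list-of-aliases table and does one nested argmax pass (running best
-- length / best category, strict > in insertion order) instead of A's sort-then-first-match.


-- ===== PORT A =====
def CATEGORY_ALIASES : PySem.Dict String String := PySem.Dict.ofList [
  ("top", "tops"), ("shirt", "tops"), ("shirts", "tops"), ("tshirt", "tops"),
  ("tshirts", "tops"), ("t-shirt", "tops"), ("t-shirts", "tops"), ("sweater", "tops"),
  ("sweatshirt", "tops"), ("jacket", "tops"), ("jean", "pants"), ("jeans", "pants"),
  ("trouser", "pants"), ("trousers", "pants"), ("short", "shorts"), ("shorts", "shorts"),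
  ("track pants", "pants"), ("skirt", "skirts"), ("skirts", "skirts"), ("dress", "dresses"),
  ("dresses", "dresses"), ("shoe", "shoes"), ("shoes", "shoes"), ("heels", "shoes"),
  ("flats", "shoes"), ("sandals", "shoes"), ("flip flops", "shoes"), ("bag", "bags"),
  ("bags", "bags"), ("handbag", "bags"), ("handbags", "bags"), ("backpack", "bags")]

-- A: text = str(value or "").strip().lower(); sort the alias items by alias length descending
-- (stable), return the category of the first alias contained in text.
def category_from_text (value : Option String) : Option String :=
  let text := PySem.Str.lower (PySem.Str.strip (value.getD ""))
  if text = "" then none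
  else
    let aliases := PySem.List.sorted CATEGORY_ALIASES.items (fun item => PySem.Str.len item.1) true
    (aliases.find? (fun item => PySem.Str.isIn item.1 text)).map Prod.snd

-- ===== PORT B =====
-- B's table: each category maps to the list of its aliases (authored once, no repetition).
def CATEGORY_TO_ALIASES : List (String × List String) := [
  ("tops", ["top", "shirt", "shirts", "tshirt", "tshirts", "t-shirt",
            "t-shirts", "sweater", "sweatshirt", "jacket"]),
  ("pants", ["jean", "jeans", "trouser", "trousers", "track pants"]),
  ("shorts", ["short", "shorts"]),
  ("skirts", ["skirt", "skirts"]),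
  ("dresses", ["dress", "dresses"]),
  ("shoes", ["shoe", "shoes", "heels", "flats", "sandals", "flip flops"]),
  ("bags", ["bag", "bags", "handbag", "handbags", "backpack"])]

-- B: same guard; then a nested pass (categories, then their aliases) keeping
-- (best_len, best_category), updating on 'al in text and len(al) > best_len'.
def category_from_text_alt (value : Option String) : Option String :=
  let text := PySem.Str.lower (PySem.Str.strip (value.getD ""))
  if text = "" then none
  else
    (CATEGORY_TO_ALIASES.foldl
      (fun acc g => g.2.foldl
        (fun acc al =>
          if PySem.Str.isIn al text && decide (acc.1 < PySem.Str.len al) then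
            (PySem.Str.len al, some g.1)
          else acc) acc)
      ((-1 : Int), (none : Option String))).2

-- ===== PRECONDITION & SPEC =====
def Spec_category_from_text (value : Option String) (out : Option String) : Prop := out = category_from_text_alt value
instance (value : Option String) (out : Option String) : Decidable (Spec_category_from_text value out) := by unfold Spec_category_from_text; infer_instance

-- ===== CLAIM (what is proved, stated in full; the proofs are below) =====
def Claim_equal_category_from_text : Prop := ∀ (value : Option String), Dom_category_from_text value → Spec_category_from_text value (category_from_text value)

-- ===== LEMMAS AND PROOFS =====

-- alias length, the shared argmax step (for a fixed containment predicate p), and the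
-- insertion comparator of A's reverse sort.
def pvKey (it : String × String) : Int := PySem.Str.len it.1

def pvStep (p : String × String → Bool) (acc : Int × Option String) (it : String × String) :
    Int × Option String :=
  if p it && decide (acc.1 < pvKey it) then (pvKey it, some it.2) else acc

def pvBef (a b : String × String) : Bool := decide (pvKey b < pvKey a)

-- B's grouped table flattened to (al, category) pairs in B's iteration order.
def pvFlat : List (String × String) :=
  CATEGORY_TO_ALIASES.flatMap (fun g => g.2.map (fun a => (a, g.1)))

-- the two iteration orders, decomposed around the one alias whose position differs
def pvX : List (String × String) := [
  ("top", "tops"), ("shirt", "tops"), ("shirts", "tops"), ("tshirt", "tops"),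
  ("tshirts", "tops"), ("t-shirt", "tops"), ("t-shirts", "tops"), ("sweater", "tops"),
  ("sweatshirt", "tops"), ("jacket", "tops"), ("jean", "pants"), ("jeans", "pants"),
  ("trouser", "pants"), ("trousers", "pants")]
def pvS1 : String × String := ("short", "shorts")
def pvS2 : String × String := ("shorts", "shorts")
def pvT : String × String := ("track pants", "pants")
def pvY : List (String × String) := [
  ("skirt", "skirts"), ("skirts", "skirts"), ("dress", "dresses"),
  ("dresses", "dresses"), ("shoe", "shoes"), ("shoes", "shoes"), ("heels", "shoes"),
  ("flats", "shoes"), ("sandals", "shoes"), ("flip flops", "shoes"), ("bag", "bags"),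
  ("bags", "bags"), ("handbag", "bags"), ("handbags", "bags"), ("backpack", "bags")]

lemma pvKey_nonneg (it : String × String) : 0 ≤ pvKey it := by
  simp [pvKey, PySem.Str.len_eq]

-- once the accumulator's best length is ≥ every remaining alias length, the fold is frozen
lemma pv_fold_frozen (p : String × String → Bool) :
    ∀ (s : List (String × String)) (acc : Int × Option String),
      (∀ it ∈ s, pvKey it ≤ acc.1) → s.foldl (pvStep p) acc = acc := by
  intro s
  induction s with
  | nil => intro acc _; rfl
  | cons x t ih =>
      intro acc h
      have hx : ¬ (acc.1 < pvKey x) := by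
        have := h x (by simp); omega
      have hstep : pvStep p acc x = acc := by
        simp [pvStep, hx]
      rw [List.foldl_cons, hstep]
      exact ih acc (fun it hit => h it (by simp [hit]))

-- on a list sorted descending by length, the argmax fold IS first-match
lemma pv_fold_desc (p : String × String → Bool) :
    ∀ (s : List (String × String)),
      s.Pairwise (fun a b => pvKey b ≤ pvKey a) →
      ∀ acc : Int × Option String, acc.1 < 0 →
        s.foldl (pvStep p) acc =
          (match s.find? p with
            | some it => (pvKey it, some it.2)
            | none => acc) := by
  intro s
  induction s with
  | nil => intro _ acc _; rfl
  | cons y t ih =>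
      intro hpw acc hacc
      rcases List.pairwise_cons.mp hpw with ⟨hy, ht⟩
      by_cases hp : p y
      · have hlt : acc.1 < pvKey y := lt_of_lt_of_le hacc (pvKey_nonneg y)
        have hstep : pvStep p acc y = (pvKey y, some y.2) := by
          simp [pvStep, hp, hlt]
        rw [List.foldl_cons, hstep, pv_fold_frozen p t _ (fun it hit => hy it hit)]
        simp [List.find?, hp]
      · have hstep : pvStep p acc y = acc := by simp [pvStep, hp]
        rw [List.foldl_cons, hstep, ih ht acc hacc]
        simp [List.find?, hp]

-- the argmax step commutes across two aliases of different lengths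
lemma pv_step_commute (p : String × String → Bool) (a b : String × String)
    (h : pvKey a ≠ pvKey b) (acc : Int × Option String) :
    pvStep p (pvStep p acc a) b = pvStep p (pvStep p acc b) a := by
  by_cases hpa : p a <;> by_cases hpb : p b <;>
    simp only [pvStep, hpa, hpb, Bool.true_and, Bool.false_and, decide_eq_true_eq] <;>
    split_ifs <;> first | rfl | omega | (exfalso; omega)

-- an element whose length differs from everything before it can be moved to the front
lemma pv_fold_move (p : String × String → Bool) :
    ∀ (zs : List (String × String)) (a : String × String) (acc : Int × Option String),
      (∀ z ∈ zs, pvKey z ≠ pvKey a) →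
      (zs ++ [a]).foldl (pvStep p) acc = (a :: zs).foldl (pvStep p) acc := by
  intro zs
  induction zs with
  | nil => intro a acc _; rfl
  | cons z t ih =>
      intro a acc h
      have hz : pvKey z ≠ pvKey a := h z (by simp)
      have hrest : ∀ y ∈ t, pvKey y ≠ pvKey a := fun y hy => h y (by simp [hy])
      calc ((z :: t) ++ [a]).foldl (pvStep p) acc
          = (t ++ [a]).foldl (pvStep p) (pvStep p acc z) := by simp
        _ = (a :: t).foldl (pvStep p) (pvStep p acc z) := ih a (pvStep p acc z) hrest
        _ = t.foldl (pvStep p) (pvStep p (pvStep p acc z) a) := by simp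
        _ = t.foldl (pvStep p) (pvStep p (pvStep p acc a) z) := by
              rw [pv_step_commute p z a hz acc]
        _ = (a :: z :: t).foldl (pvStep p) acc := by simp

-- insertBy with A's comparator preserves 'descending by length'
lemma pv_pairwise_insertBy :
    ∀ (ys : List (String × String)) (x : String × String),
      ys.Pairwise (fun a b => pvKey b ≤ pvKey a) →
      (PySem.List.insertBy pvBef x ys).Pairwise (fun a b => pvKey b ≤ pvKey a) := by
  intro ys
  induction ys with
  | nil => intro x _; simp [PySem.List.insertBy]
  | cons y t ih =>
      intro x hpw
      rcases List.pairwise_cons.mp hpw with ⟨hy, ht⟩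
      show (if pvBef x y then x :: y :: t else y :: PySem.List.insertBy pvBef x t).Pairwise _
      by_cases hb : pvBef x y
      · have hyx : pvKey y < pvKey x := by simpa [pvBef] using hb
        rw [if_pos hb]
        refine List.pairwise_cons.mpr ⟨?_, hpw⟩
        intro z hz
        rcases List.mem_cons.mp hz with rfl | hz
        · exact le_of_lt hyx
        · exact le_trans (hy z hz) (le_of_lt hyx)
      · have hxy : pvKey x ≤ pvKey y := by
          have := (not_iff_not.mpr (show pvBef x y = true ↔ pvKey y < pvKey x by simp [pvBef])).mp
            (by simpa using hb)
          omega
        rw [if_neg hb]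
        refine List.pairwise_cons.mpr ⟨?_, ih x ht⟩
        intro z hz
        rcases (PySem.List.mem_insertBy pvBef x z t).mp hz with rfl | hz
        · exact hxy
        · exact hy z hz

-- inserting x by the comparator computes the same fold as appending x
lemma pv_fold_insertBy (p : String × String → Bool) :
    ∀ (ys : List (String × String)),
      ys.Pairwise (fun a b => pvKey b ≤ pvKey a) →
      ∀ (x : String × String) (acc : Int × Option String),
        (PySem.List.insertBy pvBef x ys).foldl (pvStep p) acc =
          (ys ++ [x]).foldl (pvStep p) acc := by
  intro ys
  induction ys with
  | nil => intro _ x acc; rfl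
  | cons y t ih =>
      intro hpw x acc
      rcases List.pairwise_cons.mp hpw with ⟨hy, ht⟩
      show (if pvBef x y then x :: y :: t else y :: PySem.List.insertBy pvBef x t).foldl
            (pvStep p) acc = _
      by_cases hb : pvBef x y
      · have hyx : pvKey y < pvKey x := by simpa [pvBef] using hb
        rw [if_pos hb, ← pv_fold_move p (y :: t) x acc]
        intro z hz
        rcases List.mem_cons.mp hz with rfl | hz
        · omega
        · have := hy z hz; omega
      · rw [if_neg hb]
        calc (y :: PySem.List.insertBy pvBef x t).foldl (pvStep p) acc
            = (PySem.List.insertBy pvBef x t).foldl (pvStep p) (pvStep p acc y) := by simp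
          _ = (t ++ [x]).foldl (pvStep p) (pvStep p acc y) := ih ht x (pvStep p acc y)
          _ = ((y :: t) ++ [x]).foldl (pvStep p) acc := by simp

-- the whole insertion sort computes the same fold as the original order
lemma pv_fold_sort (p : String × String → Bool) :
    ∀ (l ys : List (String × String)) (acc : Int × Option String),
      ys.Pairwise (fun a b => pvKey b ≤ pvKey a) →
      (l.foldl (fun a x => PySem.List.insertBy pvBef x a) ys).foldl (pvStep p) acc =
        (ys ++ l).foldl (pvStep p) acc := by
  intro l
  induction l with
  | nil => intro ys acc _; simp
  | cons x t ih =>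
      intro ys acc hpw
      calc ((x :: t).foldl (fun a x => PySem.List.insertBy pvBef x a) ys).foldl (pvStep p) acc
          = (t.foldl (fun a x => PySem.List.insertBy pvBef x a)
              (PySem.List.insertBy pvBef x ys)).foldl (pvStep p) acc := by rfl
        _ = ((PySem.List.insertBy pvBef x ys) ++ t).foldl (pvStep p) acc :=
              ih _ acc (pv_pairwise_insertBy ys x hpw)
        _ = t.foldl (pvStep p) ((PySem.List.insertBy pvBef x ys).foldl (pvStep p) acc) := by
              rw [List.foldl_append]
        _ = t.foldl (pvStep p) ((ys ++ [x]).foldl (pvStep p) acc) := by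
              rw [pv_fold_insertBy p ys hpw x acc]
        _ = (ys ++ x :: t).foldl (pvStep p) acc := by
              rw [List.foldl_append]; simp

-- the argmax fold over A's sorted list equals the same fold over the flat dict order
lemma pv_fold_sorted_eq (p : String × String → Bool) (L : List (String × String))
    (acc : Int × Option String) :
    (PySem.List.sorted L (fun item => PySem.Str.len item.1) true).foldl (pvStep p) acc =
      L.foldl (pvStep p) acc := by
  rw [PySem.List.sorted_rev_eq_foldl_insertBy]
  have h := pv_fold_sort p L [] acc List.Pairwise.nil
  rw [List.nil_append] at h
  exact h

-- B's nested fold over the grouped table is the flat fold over pvFlat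
lemma pv_nested_eq_flat (p : String × String → Bool) :
    ∀ (gs : List (String × List String)) (acc : Int × Option String),
      gs.foldl (fun acc g => g.2.foldl (fun acc a => pvStep p acc (a, g.1)) acc) acc =
        (gs.flatMap (fun g => g.2.map (fun a => (a, g.1)))).foldl (pvStep p) acc := by
  intro gs
  induction gs with
  | nil => intro acc; rfl
  | cons g t ih =>
      intro acc
      rw [List.foldl_cons, List.flatMap_cons, List.foldl_append, List.foldl_map, ih]

-- the two concrete iteration orders, decomposed
lemma pv_items_decomp : CATEGORY_ALIASES.items = pvX ++ ([pvS1, pvS2, pvT] ++ pvY) := by decide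
lemma pv_flat_decomp : pvFlat = pvX ++ ([pvT, pvS1, pvS2] ++ pvY) := by decide

-- 'track pants' (length 11) shares its length with no other al, so moving it across
-- 'short' (5) and 'shorts' (6) does not change the argmax fold
lemma pv_fold_flat_eq_items (p : String × String → Bool) (acc : Int × Option String) :
    pvFlat.foldl (pvStep p) acc = CATEGORY_ALIASES.items.foldl (pvStep p) acc := by
  rw [pv_flat_decomp, pv_items_decomp, List.foldl_append, List.foldl_append,
      List.foldl_append, List.foldl_append]
  set b := pvX.foldl (pvStep p) acc with hb
  have hmid : ([pvT, pvS1, pvS2] : List (String × String)).foldl (pvStep p) b =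
      ([pvS1, pvS2, pvT] : List (String × String)).foldl (pvStep p) b := by
    show pvStep p (pvStep p (pvStep p b pvT) pvS1) pvS2 =
      pvStep p (pvStep p (pvStep p b pvS1) pvS2) pvT
    rw [pv_step_commute p pvT pvS1 (by decide) b,
        pv_step_commute p pvT pvS2 (by decide) (pvStep p b pvS1)]
  rw [hmid]

-- ===== VERDICT (by name: the statement is the Claim_ definition above) =====
theorem category_from_text_spec : Claim_equal_category_from_text := by
  intro value _
  unfold Spec_category_from_text category_from_text category_from_text_alt
  set text := PySem.Str.lower (PySem.Str.strip (value.getD "")) with htext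
  by_cases hempty : text = ""
  · simp [hempty]
  · rw [if_neg hempty, if_neg hempty]
    set p : String × String → Bool := fun item => PySem.Str.isIn item.1 text with hp
    set L := CATEGORY_ALIASES.items with hL
    have hB : (CATEGORY_TO_ALIASES.foldl
        (fun acc g => g.2.foldl
          (fun acc al =>
            if PySem.Str.isIn al text && decide (acc.1 < PySem.Str.len al) then
              (PySem.Str.len al, some g.1)
            else acc) acc) ((-1 : Int), (none : Option String))) =
        pvFlat.foldl (pvStep p) ((-1 : Int), (none : Option String)) := by
      exact pv_nested_eq_flat p CATEGORY_TO_ALIASES ((-1 : Int), (none : Option String))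
    rw [hB, pv_fold_flat_eq_items p, ← hL,
        ← pv_fold_sorted_eq p L ((-1 : Int), (none : Option String))]
    have hpw := PySem.List.sorted_pairwise_rev L (fun item => PySem.Str.len item.1)
    have hpw' : (PySem.List.sorted L (fun item => PySem.Str.len item.1) true).Pairwise
        (fun a b => pvKey b ≤ pvKey a) := by simpa [pvKey] using hpw
    rw [pv_fold_desc p _ hpw' ((-1 : Int), (none : Option String)) (by norm_num)]
    show Option.map Prod.snd
        (List.find? p (PySem.List.sorted L (fun item => PySem.Str.len item.1) true)) = _
    cases hfind : (PySem.List.sorted L (fun item => PySem.Str.len item.1) true).find? p with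
    | none => rfl
    | some it => rfl
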